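-- pv_equiv track=rewrite | github.com/ilovecoffeeeee/python | dayoffCalender/dayoff.py | day_off
-- ===== SOURCE A (Python) =====
-- def day_off(person_date):
--
-- 	people = []
-- 	dates = []
--
-- 	for person, date in person_date.items():
-- 		people.append(person)
-- 		dates = dates + date
--
-- 	date_person = {}
--
-- 	for date in dates:
-- 		date_person[date] = []
--
-- 	for person in people:
-- 		for date in person_date[person]:
-- 			date_person.setdefault(date, []).append(person)
-- 			date_person[date].sort()
--
-- 	date_person = dict(sorted(date_person.items(), key=lambda  x: x[0]))
--
-- 	return date_person
-- ===== SOURCE B (Python) =====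
-- from itertools import groupby
--
--
-- def day_off(person_date):
--     pairs = sorted(
--         (date, person)
--         for person, dates in person_date.items()
--         for date in dates
--     )
--     return {
--         date: [person for _, person in group]
--         for date, group in groupby(pairs, key=lambda pair: pair[0])
--     }
-- ===== Notes on version B (the rewrite author's own statement) =====
-- stated objective: faster
-- what changed: A builds a date-keyed dict with setdefault and re-sorts each person list after every single append, then sorts the items at the end; B flattens the mapping to (date, person) pairs, sorts them once globally, and emits the result in a single itertools.groupby pass with no per-date sorting and no intermediate dict.
import Mathlib
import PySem

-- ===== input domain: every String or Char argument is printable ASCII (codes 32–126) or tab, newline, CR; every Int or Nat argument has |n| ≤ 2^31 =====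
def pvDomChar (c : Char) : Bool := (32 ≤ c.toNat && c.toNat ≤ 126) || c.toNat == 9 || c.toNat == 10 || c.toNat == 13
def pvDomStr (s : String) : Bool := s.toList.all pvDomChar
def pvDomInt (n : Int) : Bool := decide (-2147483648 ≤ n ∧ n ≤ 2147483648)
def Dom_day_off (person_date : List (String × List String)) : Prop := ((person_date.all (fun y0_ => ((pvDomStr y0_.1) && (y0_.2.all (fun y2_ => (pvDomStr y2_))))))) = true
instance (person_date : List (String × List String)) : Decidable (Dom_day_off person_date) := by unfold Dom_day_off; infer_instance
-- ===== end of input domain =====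

-- B replaces A's dict-building with per-date re-sorting by one global sort of the (date,
-- person) pairs followed by a single grouping pass (objective: faster; measured by the check).

-- ===== PORT A =====
def day_off (person_date : List (String × List String)) : List (String × List String) :=
  -- people = []; dates = []; for person, date in person_date.items(): ...
  let st := person_date.foldl
    (fun (acc : List String × List String) pd => (acc.1 ++ [pd.1], acc.2 ++ pd.2)) ([], [])
  let people := st.1
  let dates := st.2
  -- date_person = {}; for date in dates: date_person[date] = []
  let dp1 : PySem.Dict String (List String) :=
    dates.foldl (fun d date => d.insert date ([] : List String)) PySem.Dict.empty
  -- for person in people: for date in person_date[person]: setdefault/append; sort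
  let dp2 : PySem.Dict String (List String) :=
    people.foldl (fun d person =>
      ((PySem.Dict.mk person_date).getD person []).foldl (fun d date =>
        ((d.setdefault date []).modify date [] (fun v => v ++ [person])).modify date []
          (fun v => PySem.List.sorted v (fun x => x))) d) dp1
  -- date_person = dict(sorted(date_person.items(), key=lambda x: x[0]))
  PySem.List.sorted dp2.items (fun x => x.1)

-- ===== PORT B =====
-- itertools.groupby over the sorted pair list: one run per distinct date
def pvGroupRuns : List (String × String) → List (String × List String)
  | [] => []
  | (d, p) :: rest =>
      (d, p :: (rest.takeWhile (fun q => q.1 == d)).map (fun q => q.2)) ::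
        pvGroupRuns (rest.dropWhile (fun q => q.1 == d))
  termination_by l => l.length
  decreasing_by
    simp only [List.length_cons]
    exact Nat.lt_succ_of_le (List.length_dropWhile_le _ _)

def day_off_alt (person_date : List (String × List String)) : List (String × List String) :=
  let pairs := person_date.flatMap (fun pd => pd.2.map (fun date => (date, pd.1)))
  pvGroupRuns (PySem.List.sorted2 pairs (fun q => q.1) (fun q => q.2))

-- ===== PRECONDITION & SPEC =====
-- Pre_ excludes association lists with duplicate person keys: the Python parameter is a dict,
-- so such lists do not correspond to any Python input.
def Pre_day_off (person_date : List (String × List String)) : Prop :=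
  (person_date.map Prod.fst).Nodup
instance (person_date : List (String × List String)) : Decidable (Pre_day_off person_date) := by
  unfold Pre_day_off; infer_instance

def pvWitness_day_off : (List (String × List String)) :=
  [("ann", ["mon", "tue"]), ("bob", ["tue"])]

def Spec_day_off (person_date : List (String × List String)) (out : List (String × List String)) : Prop := out = day_off_alt person_date
instance (person_date : List (String × List String)) (out : List (String × List String)) : Decidable (Spec_day_off person_date out) := by unfold Spec_day_off; infer_instance

-- ===== CLAIM (what is proved, stated in full; the proofs are below) =====
def Claim_equal_day_off : Prop := ∀ (person_date : List (String × List String)), Dom_day_off person_date → Pre_day_off person_date → Spec_day_off person_date (day_off person_date)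

-- ===== LEMMAS AND PROOFS =====

-- Weak lexicographic order on (date, person) pairs; Python's tuple `<=`.
def pvPairLe (a b : String × String) : Prop := a.1 < b.1 ∨ (a.1 = b.1 ∧ a.2 ≤ b.2)

-- one step of A's third loop, as a function of one (date, person) pair
def pvStep (d : PySem.Dict String (List String)) (q : String × String) : PySem.Dict String (List String) :=
  ((d.setdefault q.1 []).modify q.1 [] (fun v => v ++ [q.2])).modify q.1 []
    (fun v => PySem.List.sorted v (fun x => x))

theorem pvLexLt_false_iff (a b : String × String) :
    ((decide (a.1 < b.1) || (!decide (b.1 < a.1) && decide (a.2 < b.2))) = false) ↔ pvPairLe b a := by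
  unfold pvPairLe
  simp only [Bool.or_eq_false_iff, Bool.and_eq_false_iff, decide_eq_false_iff_not,
    Bool.not_eq_false', decide_eq_true_eq]
  constructor
  · rintro ⟨h1, h2 | h2⟩
    · exact Or.inl h2
    · by_cases hba : b.1 < a.1
      · exact Or.inl hba
      · exact Or.inr ⟨le_antisymm (le_of_not_gt h1) (le_of_not_gt hba), le_of_not_gt h2⟩
  · rintro (h | ⟨h1, h2⟩)
    · exact ⟨not_lt.mpr h.le, Or.inl h⟩
    · exact ⟨not_lt.mpr h1.le, Or.inr (not_lt.mpr h2)⟩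

theorem pvPairLe_trans {a b c : String × String} (h1 : pvPairLe a b) (h2 : pvPairLe b c) :
    pvPairLe a c := by
  rcases h1 with h1 | ⟨e1, l1⟩ <;> rcases h2 with h2 | ⟨e2, l2⟩
  · exact Or.inl (h1.trans h2)
  · exact Or.inl (e2 ▸ h1)
  · exact Or.inl (e1 ▸ h2)
  · exact Or.inr ⟨e1.trans e2, l1.trans l2⟩

theorem pvLexLt_true_imp (a b : String × String)
    (h : (decide (a.1 < b.1) || (!decide (b.1 < a.1) && decide (a.2 < b.2))) = true) : pvPairLe a b := by
  simp only [Bool.or_eq_true, Bool.and_eq_true, Bool.not_eq_true', decide_eq_true_eq,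
    decide_eq_false_iff_not] at h
  rcases h with h | ⟨h1, h2⟩
  · exact Or.inl h
  · by_cases hab : a.1 < b.1
    · exact Or.inl hab
    · exact Or.inr ⟨le_antisymm (le_of_not_gt h1) (le_of_not_gt hab), h2.le⟩

theorem pvInsertBy_pairwise (x : String × String) (ys : List (String × String))
    (h : ys.Pairwise pvPairLe) :
    (PySem.List.insertBy
      (fun a b => decide (a.1 < b.1) || (!decide (b.1 < a.1) && decide (a.2 < b.2))) x ys).Pairwise pvPairLe := by
  induction ys with
  | nil => simp [PySem.List.insertBy]
  | cons y ys ih =>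
    rw [List.pairwise_cons] at h
    rw [PySem.List.insertBy]
    split
    · next hxy =>
      refine List.Pairwise.cons ?_ (List.Pairwise.cons h.1 h.2)
      intro z hz
      rcases List.mem_cons.mp hz with rfl | hz
      · exact pvLexLt_true_imp x z hxy
      · exact pvPairLe_trans (pvLexLt_true_imp x y hxy) (h.1 z hz)
    · next hxy =>
      refine List.Pairwise.cons ?_ (ih h.2)
      intro z hz
      rcases (PySem.List.mem_insertBy _ x z ys).mp hz with rfl | hz
      · exact (pvLexLt_false_iff z y).mp (Bool.of_not_eq_true hxy)
      · exact h.1 z hz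

theorem pvSorted2_pairwise (xs : List (String × String)) :
    (PySem.List.sorted2 xs (fun q => q.1) (fun q => q.2)).Pairwise pvPairLe := by
  show List.Pairwise pvPairLe (List.foldl (fun acc x => PySem.List.insertBy
      (fun a b => decide (a.1 < b.1) || (!decide (b.1 < a.1) && decide (a.2 < b.2))) x acc) [] xs)
  suffices h : ∀ acc, acc.Pairwise pvPairLe → List.Pairwise pvPairLe (List.foldl (fun acc x => PySem.List.insertBy
      (fun a b => decide (a.1 < b.1) || (!decide (b.1 < a.1) && decide (a.2 < b.2))) x acc) acc xs) from
    h [] (by simp)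
  induction xs with
  | nil => intro acc hacc; exact hacc
  | cons x xs ih =>
    intro acc hacc
    exact ih _ (pvInsertBy_pairwise x acc hacc)

theorem pvFoldPair (l : List (String × List String)) (a b : List String) :
    l.foldl (fun (acc : List String × List String) pd => (acc.1 ++ [pd.1], acc.2 ++ pd.2)) (a, b)
      = (a ++ l.map Prod.fst, b ++ l.flatMap Prod.snd) := by
  induction l generalizing a b with
  | nil => simp
  | cons x xs ih => simp [ih]

theorem pvPhaseOne (person_date : List (String × List String)) :
    person_date.foldl (fun (acc : List String × List String) pd => (acc.1 ++ [pd.1], acc.2 ++ pd.2)) ([], [])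
      = (person_date.map Prod.fst, person_date.flatMap Prod.snd) := by
  simpa using pvFoldPair person_date [] []

theorem pvInitGetD (dates : List String) (c : String) :
    ((dates.foldl (fun d date => d.insert date ([] : List String)) PySem.Dict.empty).getD c []) = [] := by
  suffices h : ∀ (d : PySem.Dict String (List String)), d.getD c [] = [] →
      ((dates.foldl (fun d date => d.insert date ([] : List String)) d).getD c []) = [] from
    h _ (PySem.Dict.getD_empty _ _)
  induction dates with
  | nil => intro d h; exact h
  | cons x xs ih =>
    intro d h
    refine ih _ ?_
    rw [PySem.Dict.getD_insert]
    split <;> simp [h]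

theorem pvInitKeys (dates : List String) :
    ((dates.foldl (fun d date => d.insert date ([] : List String)) PySem.Dict.empty).keys)
      = PySem.Set.ofList dates := by
  rw [show (fun (d : PySem.Dict String (List String)) date => d.insert date ([] : List String))
      = fun d x => d.insert x ((fun (_ : PySem.Dict String (List String)) (_ : String) => ([] : List String)) d x) from rfl,
    PySem.Dict.keys_foldl_insert, PySem.Dict.keys_empty]
  exact PySem.Set.update_empty dates

theorem pvLookup (person_date : List (String × List String)) (h : (person_date.map Prod.fst).Nodup) :
    ∀ pd ∈ person_date, (PySem.Dict.mk person_date).getD pd.1 [] = pd.2 := by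
  induction person_date with
  | nil => simp
  | cons x xs ih =>
    simp only [List.map_cons, List.nodup_cons] at h
    intro pd hpd
    rcases List.mem_cons.mp hpd with rfl | hmem
    · rw [PySem.Dict.getD_eq_get?_getD, PySem.Dict.get?_mk_cons]
      simp
    · have hne : x.1 ≠ pd.1 := fun he => h.1 (he ▸ List.mem_map_of_mem hmem)
      rw [PySem.Dict.getD_eq_get?_getD, PySem.Dict.get?_mk_cons]
      rw [if_neg (by simpa using hne)]
      rw [← PySem.Dict.getD_eq_get?_getD]
      exact ih h.2 pd hmem

theorem pvDropWhile_head_false {α : Type} (p : α → Bool) (l t : List α) (a : α)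
    (h : List.dropWhile p l = a :: t) : p a = false := by
  induction l with
  | nil => simp at h
  | cons x xs ih =>
    rw [List.dropWhile_cons] at h
    split at h
    · exact ih h
    · next hx => cases h; simpa using hx

theorem pvGroupRuns_spec (s : List (String × String)) (hs : s.Pairwise pvPairLe) :
    ((pvGroupRuns s).map Prod.fst).Pairwise (· < ·)
    ∧ (∀ d, d ∈ (pvGroupRuns s).map Prod.fst ↔ d ∈ s.map Prod.fst)
    ∧ (∀ g ∈ pvGroupRuns s, g.2 = (s.filter (fun q => q.1 == g.1)).map Prod.snd) := by
  induction s using pvGroupRuns.induct with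
  | case1 => simp [pvGroupRuns]
  | case2 d p rest ih =>
    rw [List.pairwise_cons] at hs
    have hrest : rest.Pairwise pvPairLe := hs.2
    have hhd : ∀ q ∈ rest, pvPairLe (d, p) q := hs.1
    set run := rest.takeWhile (fun q => q.1 == d) with hrun
    set rest' := rest.dropWhile (fun q => q.1 == d) with hrest'def
    have hsplit : run ++ rest' = rest := List.takeWhile_append_dropWhile
    have hrestP' : rest'.Pairwise pvPairLe := hrest.sublist (List.dropWhile_sublist _)
    have htake : ∀ q ∈ run, q.1 = d := fun q hq => by
      have := List.mem_takeWhile_imp hq; simpa using this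
    have hstrict : ∀ q ∈ rest', d < q.1 := by
      cases hr : rest' with
      | nil => simp
      | cons a t =>
        have ha : (a.1 == d) = false :=
          pvDropWhile_head_false _ rest t a (hrest'def.symm.trans hr)
        have hane : a.1 ≠ d := by simpa using ha
        have hamem : a ∈ rest := (List.dropWhile_sublist _).subset
          (hrest'def ▸ (hr ▸ (List.mem_cons_self : a ∈ a :: t)))
        have hda : d < a.1 := by
          rcases hhd a hamem with h | ⟨he, _⟩
          · exact h
          · exact absurd he.symm hane
        intro q hq
        rcases List.mem_cons.mp hq with rfl | hq
        · exact hda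
        · rcases (List.pairwise_cons.mp (hr ▸ hrestP')).1 q hq with h | ⟨he, _⟩
          · exact hda.trans h
          · exact he ▸ hda
    have ihh := ih hrestP'
    have hkeys' : ∀ k ∈ (pvGroupRuns rest').map Prod.fst, d < k := by
      intro k hk
      rcases List.mem_map.mp ((ihh.2.1 k).mp hk) with ⟨q, hq, rfl⟩
      exact hstrict q hq
    have hmr : (List.map Prod.fst rest) = List.map Prod.fst run ++ List.map Prod.fst rest' := by
      rw [← hsplit]; simp
    rw [pvGroupRuns]
    refine ⟨?_, ?_, ?_⟩
    · rw [List.map_cons, List.pairwise_cons]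
      exact ⟨hkeys', ihh.1⟩
    · intro d'
      simp only [List.map_cons, List.mem_cons, hmr, List.mem_append]
      constructor
      · rintro (rfl | h)
        · exact Or.inl rfl
        · exact Or.inr (Or.inr ((ihh.2.1 d').mp h))
      · rintro (rfl | h | h)
        · exact Or.inl rfl
        · rcases List.mem_map.mp h with ⟨q, hq, rfl⟩
          exact Or.inl (htake q hq)
        · exact Or.inr ((ihh.2.1 d').mpr h)
    · intro g hg
      have hfilterd : ((d, p) :: rest).filter (fun q => q.1 == d) = (d, p) :: run := by
        conv_lhs => rw [← hsplit]
        rw [List.filter_cons]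
        simp only [beq_self_eq_true, if_pos]
        rw [List.filter_append,
          List.filter_eq_self.mpr (fun q hq => by simpa using htake q hq),
          List.filter_eq_nil_iff.mpr (fun q hq => by
            simpa using (ne_of_gt (hstrict q hq)))]
        simp
      rcases List.mem_cons.mp hg with rfl | hg
      · simp only [hfilterd]
        simp [hrun]
      · have hval := ihh.2.2 g hg
        have hgk : d < g.1 := hkeys' g.1 (List.mem_map_of_mem hg)
        have hstep : ((d, p) :: rest).filter (fun q => q.1 == g.1)
            = rest'.filter (fun q => q.1 == g.1) := by
          conv_lhs => rw [← hsplit]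
          rw [List.filter_cons]
          rw [if_neg (by simpa using (ne_of_lt hgk))]
          rw [List.filter_append,
            List.filter_eq_nil_iff.mpr (fun q hq => by
              simpa using fun he => (ne_of_lt hgk) ((htake q hq).symm.trans he))]
          simp
        rw [hstep]
        exact hval

theorem pvPhaseThree_flat (person_date : List (String × List String))
    (h : (person_date.map Prod.fst).Nodup) (d0 : PySem.Dict String (List String)) :
    (person_date.map Prod.fst).foldl (fun d person =>
        ((PySem.Dict.mk person_date).getD person []).foldl (fun d date =>
          ((d.setdefault date []).modify date [] (fun v => v ++ [person])).modify date []
            (fun v => PySem.List.sorted v (fun x => x))) d) d0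
      = (person_date.flatMap (fun pd => pd.2.map (fun date => (date, pd.1)))).foldl pvStep d0 := by
  rw [List.foldl_map]
  have hlk := pvLookup person_date h
  -- replace the dict lookup by the pair's own list, then flatten
  have : ∀ (l : List (String × List String)), (∀ pd ∈ l, pd ∈ person_date) → ∀ d0,
      l.foldl (fun d pd =>
        ((PySem.Dict.mk person_date).getD pd.1 []).foldl (fun d date =>
          ((d.setdefault date []).modify date [] (fun v => v ++ [pd.1])).modify date []
            (fun v => PySem.List.sorted v (fun x => x))) d) d0
      = (l.flatMap (fun pd => pd.2.map (fun date => (date, pd.1)))).foldl pvStep d0 := by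
    intro l
    induction l with
    | nil => intro _ _; rfl
    | cons x xs ih =>
      intro hmem d0
      rw [List.foldl_cons, List.flatMap_cons, List.foldl_append, hlk x (hmem x List.mem_cons_self)]
      rw [ih (fun pd hpd => hmem pd (List.mem_cons_of_mem _ hpd))]
      congr 1
      rw [List.foldl_map]
      rfl
  exact this person_date (fun pd hpd => hpd) d0

theorem pvFold_keys (l : List (String × String)) (d : PySem.Dict String (List String))
    (hl : ∀ q ∈ l, q.1 ∈ d.keys) :
    (l.foldl pvStep d).keys = d.keys := by
  induction l generalizing d with
  | nil => rfl
  | cons q t ih =>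
    have hq : q.1 ∈ d.keys := hl q List.mem_cons_self
    have hcont : d.contains q.1 = true := by
      rw [PySem.Dict.contains_eq_decide_mem_keys]; exact decide_eq_true hq
    have hstep : (pvStep d q).keys = d.keys := by
      unfold pvStep
      rw [PySem.Dict.setdefault_of_contains _ _ hcont]
      rw [PySem.Dict.keys_modify, PySem.Dict.keys_insert_of_contains]
      · rw [PySem.Dict.keys_modify, PySem.Dict.keys_insert_of_contains _ _ hcont]
      · rw [PySem.Dict.contains_modify]; simp
    rw [List.foldl_cons, ih _ (fun r hr => by rw [hstep]; exact hl r (List.mem_cons_of_mem _ hr)), hstep]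

theorem pvFold_getD (l : List (String × String)) (d : PySem.Dict String (List String)) (c : String)
    (hc : (d.getD c []).Pairwise (· ≤ ·)) :
    ((l.foldl pvStep d).getD c [])
      = PySem.List.sorted (d.getD c [] ++ (l.filter (fun q => q.1 == c)).map Prod.snd) (fun x => x) := by
  induction l generalizing d with
  | nil =>
    simp only [List.foldl_nil, List.filter_nil, List.map_nil, List.append_nil]
    exact (PySem.List.sorted_eq_self_of_pairwise _ _ hc).symm
  | cons q t ih =>
    by_cases hqc : q.1 = c
    · subst hqc
      have hstep : (pvStep d q).getD q.1 [] = PySem.List.sorted (d.getD q.1 [] ++ [q.2]) (fun x => x) := by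
        unfold pvStep
        rw [PySem.Dict.getD_modify_self, PySem.Dict.getD_modify_self, PySem.Dict.getD_setdefault_self]
      rw [List.foldl_cons, ih (pvStep d q) ?_, hstep]
      · rw [List.filter_cons, if_pos (by simp)]
        refine PySem.List.sorted_eq_sorted_of_perm _ _ (fun x => x) (fun a b hab => hab) ?_
        refine List.Perm.trans (List.Perm.append_right _ (PySem.List.sorted_perm _ _ _)) ?_
        simp
      · rw [hstep]
        exact PySem.List.sorted_pairwise _ _
    · have hne : c ≠ q.1 := fun he => hqc he.symm
      have hstep : (pvStep d q).getD c [] = d.getD c [] := by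
        unfold pvStep
        rw [PySem.Dict.getD_modify_of_ne _ _ _ hne,
          PySem.Dict.getD_modify_of_ne _ _ _ hne]
        rw [PySem.Dict.getD_eq_get?_getD, PySem.Dict.get?_setdefault_of_ne _ _ hne,
          ← PySem.Dict.getD_eq_get?_getD]
      rw [List.foldl_cons, ih (pvStep d q) (by rw [hstep]; exact hc), hstep]
      rw [List.filter_cons, if_neg (by simpa using hqc)]

-- sorted person list for one date, built from the flat pair list
def pvValA (pairs : List (String × String)) (c : String) : List String :=
  PySem.List.sorted ((pairs.filter (fun q => q.1 == c)).map Prod.snd) (fun x => x)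

-- ===== VERDICT (by name: the statement is the Claim_ definition above) =====
-- membership transfer between the flat pair list's dates and the concatenated date list
theorem pvMapFstPairs (person_date : List (String × List String)) :
    (person_date.flatMap (fun pd => pd.2.map (fun date => (date, pd.1)))).map Prod.fst
      = person_date.flatMap Prod.snd := by
  simp [List.map_flatMap, Function.comp_def]

theorem day_off_eq_alt (person_date : List (String × List String))
    (hpre : (person_date.map Prod.fst).Nodup) :
    day_off person_date = day_off_alt person_date := by
  unfold day_off day_off_alt
  rw [pvPhaseOne]
  simp only
  set pairs := person_date.flatMap (fun pd => pd.2.map (fun date => (date, pd.1))) with hpairs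
  set dates := person_date.flatMap Prod.snd with hdates
  set dp1 := dates.foldl (fun d date => d.insert date ([] : List String)) PySem.Dict.empty with hdp1
  rw [pvPhaseThree_flat person_date hpre dp1]
  rw [← hpairs]
  set dp2 := pairs.foldl pvStep dp1 with hdp2
  -- facts about dp2
  have hmfst : pairs.map Prod.fst = dates := pvMapFstPairs person_date
  have hkeys1 : dp1.keys = PySem.Set.ofList dates := pvInitKeys dates
  have hkeys2 : dp2.keys = PySem.Set.ofList dates := by
    rw [hdp2, pvFold_keys, hkeys1]
    intro q hq
    rw [hkeys1]
    exact (PySem.Set.mem_ofList dates q.1).mpr (hmfst ▸ List.mem_map_of_mem hq)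
  have hnodupA : dp2.keys.Nodup := hkeys2 ▸ PySem.Set.nodup_ofList dates
  have hgetD : ∀ c, dp2.getD c [] = pvValA pairs c := by
    intro c
    rw [hdp2, pvFold_getD pairs dp1 c (by rw [pvInitGetD]; exact List.Pairwise.nil),
      pvInitGetD]
    rfl
  have hitems : dp2.items = dp2.keys.map (fun k => (k, pvValA pairs k)) := by
    rw [PySem.Dict.items_eq_map_keys dp2 hnodupA []]
    exact List.map_congr_left (fun k _ => by rw [hgetD k])
  -- facts about the sorted pair list and its grouping
  set s := PySem.List.sorted2 pairs (fun q => q.1) (fun q => q.2) with hsdef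
  have hsP : s.Pairwise pvPairLe := pvSorted2_pairwise pairs
  have hsperm : s.Perm pairs := PySem.List.sorted2_perm pairs _ _ _
  have spec := pvGroupRuns_spec s hsP
  set G := pvGroupRuns s with hGdef
  -- every group equals (key, pvValA key)
  have hGfun : ∀ g ∈ G, g = (g.1, pvValA pairs g.1) := by
    intro g hg
    have hval := spec.2.2 g hg
    have hperm : ((s.filter (fun q => q.1 == g.1)).map Prod.snd).Perm
        ((pairs.filter (fun q => q.1 == g.1)).map Prod.snd) :=
      (hsperm.filter _).map _
    have hpw : ((s.filter (fun q => q.1 == g.1)).map Prod.snd).Pairwise (· ≤ ·) := by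
      rw [List.pairwise_map]
      refine List.Pairwise.imp_of_mem ?_ (hsP.sublist List.filter_sublist)
      intro a b ha hb hab
      have ha1 : a.1 = g.1 := by simpa using List.of_mem_filter ha
      have hb1 : b.1 = g.1 := by simpa using List.of_mem_filter hb
      rcases hab with h | ⟨_, h⟩
      · exact absurd (hb1 ▸ ha1 ▸ h) (lt_irrefl _)
      · exact h
    have : pvValA pairs g.1 = (s.filter (fun q => q.1 == g.1)).map Prod.snd :=
      PySem.List.sorted_id_eq_of_perm_of_pairwise _ _ hperm hpw
    rw [this, ← hval]
  -- G as a map over its keys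
  have hGmap : G = (G.map Prod.fst).map (fun k => (k, pvValA pairs k)) := by
    rw [List.map_map]
    conv_lhs => rw [← List.map_id G]
    exact List.map_congr_left (fun g hg => hGfun g hg)
  -- key multiset agreement
  have hnodupG : (G.map Prod.fst).Nodup := spec.1.imp (fun h => ne_of_lt h)
  have hkeysPerm : (G.map Prod.fst).Perm dp2.keys := by
    rw [List.perm_ext_iff_of_nodup hnodupG hnodupA]
    intro k
    rw [spec.2.1 k, hkeys2]
    rw [PySem.Set.mem_ofList]
    constructor
    · intro hk
      rcases List.mem_map.mp hk with ⟨q, hq, rfl⟩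
      exact hmfst ▸ List.mem_map_of_mem (hsperm.subset hq)
    · intro hk
      rcases List.mem_map.mp (hmfst ▸ hk) with ⟨q, hq, rfl⟩
      exact List.mem_map_of_mem (hsperm.symm.subset hq)
  -- conclude via uniqueness of the key-sorted item list
  refine PySem.List.sorted_eq_of_perm_of_pairwise_lt dp2.items G (fun x => x.1) ?_ ?_
  · rw [hitems]
    conv_lhs => rw [hGmap]
    exact hkeysPerm.map _
  · rw [← List.pairwise_map]
    exact spec.1

-- ===== VERDICT (by name: the statement is the Claim_ definition above) =====
theorem day_off_spec : Claim_equal_day_off := by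
  intro person_date _hdom hpre
  unfold Spec_day_off
  exact day_off_eq_alt person_date hpre
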